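-- pv_equiv track=rewrite | github.com/Tchant90/bookbot | stats.py | get_sorted_dict
-- ===== SOURCE A (Python) =====
-- def get_sorted_dict(text):
--     count_dict = {} # Creates an empty dictionary that we will fill up with characters and their counts
--     report_list = []
--     word_list = text.split() # Splits the entire novel into a list of individual words
--     for word in word_list: # Iterate over each word in the text
--         for character in word: # Iterate over each character in each word
--             lowercase_character = str.lower(character) # Create a new variable that changes an uppercase letter to lowercase
--             if lowercase_character in count_dict: # If the character is already in our dictionary,
--                 count_dict[lowercase_character] += 1 # Add a count to the key/value pair
--             else: # If not,
--                 count_dict[lowercase_character] = 1 # Add a new key/value pair and start the count at one since it's the first occurrence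
--     list_of_count_dicts = [{"character": key, "count": value} for key, value in count_dict.items()] # Creates a list of dictionaries for each key-value pair
--     list_of_count_dicts.sort(reverse=True, key=lambda x: x["count"]) # Sort our list of dictionaries by highest first (reverse=True) with a lambda function that sets the key equal to the "count" value in each dictionary
--     for entry in list_of_count_dicts: # Iterate over the sorted list
--         if entry["character"].isalpha(): # If the list entry is alphabetical,
--             report_list.append(f"{entry['character']}: {entry['count']}") # Append the entry using this format
--         # If the entry isn't alphabetical, nothing happens
--     return report_list
-- ===== SOURCE B (Python) =====
-- def get_sorted_dict(text):
--     # Count lowercased characters of each whitespace-separated word, in first-appearance order.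
--     counts = {}
--     for word in text.split():
--         for ch in word:
--             c = ch.lower()
--             counts[c] = counts.get(c, 0) + 1
--     # Bucket characters by their count (insertion order preserved inside each bucket),
--     # then emit buckets by descending count: a counting/bucket pass instead of a comparison sort.
--     buckets = {}
--     for c, n in counts.items():
--         buckets.setdefault(n, []).append(c)
--     report = []
--     for n in sorted(buckets, reverse=True):
--         for c in buckets[n]:
--             if c.isalpha():
--                 report.append(f"{c}: {n}")
--     return report
-- ===== Notes on version B (the rewrite author's own statement) =====
-- stated objective: alternative
-- what changed: B replaces A's list-of-dicts plus comparison sort (sort of singleton dicts by a lambda key) with a counting/bucket pass: characters are bucketed by their count in a dict keyed by count, and buckets are emitted in descending count order, preserving first-appearance order inside each bucket to match the stable sort.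
import Mathlib
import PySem

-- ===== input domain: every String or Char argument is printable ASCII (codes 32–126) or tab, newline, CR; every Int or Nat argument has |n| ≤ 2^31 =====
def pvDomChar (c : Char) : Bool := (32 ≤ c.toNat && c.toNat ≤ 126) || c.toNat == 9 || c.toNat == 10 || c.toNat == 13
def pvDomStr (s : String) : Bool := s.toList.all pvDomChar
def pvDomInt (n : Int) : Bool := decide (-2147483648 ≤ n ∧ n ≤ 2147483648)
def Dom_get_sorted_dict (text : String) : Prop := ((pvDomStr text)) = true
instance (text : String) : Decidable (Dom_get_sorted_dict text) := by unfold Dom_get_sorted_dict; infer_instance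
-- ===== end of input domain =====

-- B replaces A's comparison sort of singleton count-dicts by a counting/bucket pass over a
-- dict keyed by count (equal return value; no side effects involved). Objective: alternative.

-- f"{c}: {n}" for a one-character string c and an int n (used by both ports)
def pvFmt (c : Char) (n : Int) : String := String.ofList [c] ++ ": " ++ PySem.Int.toStr n

-- ===== PORT A =====
def get_sorted_dict (text : String) : List String :=
  let count_dict : PySem.Dict Char Int :=
    (PySem.Str.split₀ text).foldl
      (fun d word => word.toList.foldl
        (fun d character =>
          -- lowercase_character := str.lower(character), inlined
          if d.contains (PySem.Chars.lowerChar character) then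
            d.insert (PySem.Chars.lowerChar character)
              (d.getD (PySem.Chars.lowerChar character) 0 + 1)
          else
            d.insert (PySem.Chars.lowerChar character) 1) d)
      PySem.Dict.empty
  -- list_of_count_dicts: each {"character": k, "count": v} modelled as the pair (k, v)
  let list_of_count_dicts : List (Char × Int) := count_dict.items
  let sortedEntries := PySem.List.sorted list_of_count_dicts (fun x => x.2) true
  sortedEntries.foldl
    (fun report_list entry =>
      if PySem.Chars.isalpha entry.1 then report_list ++ [pvFmt entry.1 entry.2]
      else report_list)
    []

-- ===== PORT B =====
def get_sorted_dict_alt (text : String) : List String :=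
  let counts : PySem.Dict Char Int :=
    (PySem.Str.split₀ text).foldl
      (fun d word => word.toList.foldl
        (fun d ch =>
          -- c := ch.lower(), inlined
          d.insert (PySem.Chars.lowerChar ch)
            (d.getD (PySem.Chars.lowerChar ch) 0 + 1)) d)
      PySem.Dict.empty
  -- buckets.setdefault(n, []).append(c)  ==  modify n [] (· ++ [c])
  let buckets : PySem.Dict Int (List Char) :=
    counts.items.foldl (fun b p => b.modify p.2 [] (fun l => l ++ [p.1])) PySem.Dict.empty
  (PySem.List.sorted buckets.keys (fun k => k) true).foldl
    (fun report n =>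
      (buckets.getD n []).foldl
        (fun report c =>
          if PySem.Chars.isalpha c then report ++ [pvFmt c n] else report)
        report)
    []

-- ===== PRECONDITION & SPEC =====
def Spec_get_sorted_dict (text : String) (out : List String) : Prop := out = get_sorted_dict_alt text
instance (text : String) (out : List String) : Decidable (Spec_get_sorted_dict text out) := by unfold Spec_get_sorted_dict; infer_instance

-- ===== CLAIM (what is proved, stated in full; the proofs are below) =====
def Claim_equal_get_sorted_dict : Prop := ∀ (text : String), Dom_get_sorted_dict text → Spec_get_sorted_dict text (get_sorted_dict text)

-- ===== LEMMAS AND PROOFS =====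

-- insert k into a strictly descending list of distinct keys (no-op if present)
def pvInsertDesc (k : Int) : List Int → List Int
  | [] => [k]
  | n :: ns => if n < k then k :: n :: ns else if k = n then n :: ns else n :: pvInsertDesc k ns

-- concatenation of the key-buckets of xs, in the order of ks
def pvBlocks {α : Type} (key : α → Int) (ks : List Int) (xs : List α) : List α :=
  ks.flatMap (fun n => xs.filter (fun p => key p == n))

lemma pvInsertDesc_cons (k n : Int) (ns : List Int) :
    pvInsertDesc k (n :: ns)
      = if n < k then k :: n :: ns else if k = n then n :: ns else n :: pvInsertDesc k ns := rfl

lemma pvMem_insertDesc (k : Int) (ks : List Int) (m : Int) :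
    m ∈ pvInsertDesc k ks ↔ m = k ∨ m ∈ ks := by
  induction ks with
  | nil => simp [pvInsertDesc]
  | cons n ns ih =>
    rw [pvInsertDesc_cons]
    split_ifs with h1 h2
    · simp
    · subst h2
      simp
    · simp [ih]
      tauto

lemma pvInsertDesc_pairwise (k : Int) (ks : List Int)
    (h : ks.Pairwise (fun a b => b < a)) :
    (pvInsertDesc k ks).Pairwise (fun a b => b < a) := by
  induction ks with
  | nil => simp [pvInsertDesc]
  | cons n ns ih =>
    rcases h with _ | ⟨hn, hns⟩
    rw [pvInsertDesc_cons]
    split_ifs with h1 h2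
    · refine List.Pairwise.cons ?_ (List.Pairwise.cons hn hns)
      intro m hm
      rcases List.mem_cons.mp hm with rfl | hm
      · exact h1
      · exact lt_trans (hn m hm) h1
    · exact List.Pairwise.cons hn hns
    · refine List.Pairwise.cons ?_ (ih hns)
      intro m hm
      rcases (pvMem_insertDesc k ns m).mp hm with rfl | hm
      · omega
      · exact hn m hm

lemma pvInsertDesc_of_mem (k : Int) (ks : List Int)
    (h : ks.Pairwise (fun a b => b < a)) (hk : k ∈ ks) :
    pvInsertDesc k ks = ks := by
  induction ks with
  | nil => simp at hk
  | cons n ns ih =>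
    rcases h with _ | ⟨hn, hns⟩
    rw [pvInsertDesc_cons]
    rcases List.mem_cons.mp hk with rfl | hk
    · rw [if_neg (lt_irrefl k), if_pos rfl]
    · have hlt : k < n := hn k hk
      rw [if_neg (by omega), if_neg (by omega), ih hns hk]

lemma pvInsertDesc_perm_of_not_mem (k : Int) (ks : List Int) (hk : k ∉ ks) :
    (pvInsertDesc k ks).Perm (k :: ks) := by
  induction ks with
  | nil => simp [pvInsertDesc]
  | cons n ns ih =>
    have hkn : k ≠ n := fun h => hk (h ▸ List.mem_cons_self)
    rw [pvInsertDesc_cons]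
    by_cases h1 : n < k
    · rw [if_pos h1]
    · rw [if_neg h1, if_neg hkn]
      have := ih (fun h => hk (List.mem_cons_of_mem _ h))
      exact (List.Perm.cons n this).trans (List.Perm.swap k n ns)

lemma pvInsertBy_append_of_not_before {α : Type} (bef : α → α → Bool) (x : α)
    (ys zs : List α) (h : ∀ y ∈ ys, bef x y = false) :
    PySem.List.insertBy bef x (ys ++ zs) = ys ++ PySem.List.insertBy bef x zs := by
  induction ys with
  | nil => simp
  | cons y ys ih =>
    have hy : bef x y = false := h y List.mem_cons_self
    simp [PySem.List.insertBy, hy, ih (fun y hy => h y (List.mem_cons_of_mem _ hy))]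

lemma pvInsertBy_eq_cons {α : Type} (bef : α → α → Bool) (x : α) (zs : List α)
    (h : ∀ y ∈ zs, bef x y = true) :
    PySem.List.insertBy bef x zs = x :: zs := by
  cases zs with
  | nil => simp [PySem.List.insertBy]
  | cons z zs => simp [PySem.List.insertBy, h z List.mem_cons_self]

lemma pvMem_blocks {α : Type} (key : α → Int) (ks : List Int) (xs : List α) (y : α)
    (hy : y ∈ pvBlocks key ks xs) : key y ∈ ks := by
  rcases List.mem_flatMap.mp hy with ⟨n, hn, hyn⟩
  have := List.of_mem_filter hyn
  simpa [beq_iff_eq] using (beq_iff_eq.mp this) ▸ hn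

lemma pvBlocks_cons {α : Type} (key : α → Int) (n : Int) (ns : List Int) (xs : List α) :
    pvBlocks key (n :: ns) xs = xs.filter (fun p => key p == n) ++ pvBlocks key ns xs := rfl

lemma pvFilter_eq_nil_of_ne {α : Type} (key : α → Int) (xs : List α) (k : Int)
    (h : ∀ p ∈ xs, key p ≠ k) : xs.filter (fun p => key p == k) = [] := by
  apply List.filter_eq_nil_iff.mpr
  intro p hp
  simpa [beq_iff_eq] using h p hp

lemma pvBlocks_append_of_not_mem {α : Type} (key : α → Int) (ks : List Int)
    (xs : List α) (x : α) (hx : key x ∉ ks) :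
    pvBlocks key ks (xs ++ [x]) = pvBlocks key ks xs := by
  induction ks with
  | nil => rfl
  | cons n ns ih =>
    have hne : (key x == n) = false := by
      simp only [beq_eq_false_iff_ne, ne_eq]
      exact fun h => hx (h ▸ List.mem_cons_self)
    rw [pvBlocks_cons, pvBlocks_cons, List.filter_append,
      ih (fun h => hx (List.mem_cons_of_mem _ h))]
    simp [hne]

lemma pvIns {α : Type} (key : α → Int) (x : α) (xs : List α) :
    ∀ ks : List Int, ks.Pairwise (fun a b => b < a) →
    ((key x ∉ ks) → ∀ p ∈ xs, key p ≠ key x) →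
    PySem.List.insertBy (fun a b => decide (key b < key a)) x (pvBlocks key ks xs)
      = pvBlocks key (pvInsertDesc (key x) ks) (xs ++ [x]) := by
  intro ks
  induction ks with
  | nil =>
    intro _ h
    have hfilter : xs.filter (fun p => key p == key x) = [] :=
      pvFilter_eq_nil_of_ne key xs (key x) (h (by simp))
    show PySem.List.insertBy _ x [] = pvBlocks key [key x] (xs ++ [x])
    rw [pvBlocks_cons, List.filter_append, hfilter]
    simp [PySem.List.insertBy, pvBlocks]
  | cons n ns ih =>
    intro hpw h
    rcases hpw with _ | ⟨hn, hns⟩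
    rw [pvBlocks_cons, pvInsertDesc_cons]
    by_cases h1 : n < key x
    · rw [if_pos h1]
      have hknotin : key x ∉ n :: ns := by
        intro hm
        rcases List.mem_cons.mp hm with heq | hm
        · omega
        · have := hn _ hm; omega
      have hfilter : xs.filter (fun p => key p == key x) = [] :=
        pvFilter_eq_nil_of_ne key xs (key x) (h hknotin)
      rw [pvInsertBy_eq_cons]
      · rw [pvBlocks_cons, List.filter_append, hfilter,
          pvBlocks_append_of_not_mem key (n :: ns) xs x hknotin, pvBlocks_cons]
        simp
      · intro y hy
        rcases List.mem_append.mp hy with hy | hy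
        · have := beq_iff_eq.mp (List.mem_filter.mp hy).2
          simp only [decide_eq_true_eq]; omega
        · have := hn _ (pvMem_blocks key ns xs y hy)
          simp only [decide_eq_true_eq]; omega
    · by_cases h2 : key x = n
      · rw [if_neg h1, if_pos h2]
        have hkns : key x ∉ ns := by
          intro hm; have := hn _ hm; omega
        rw [pvInsertBy_append_of_not_before]
        · rw [pvInsertBy_eq_cons]
          · rw [pvBlocks_cons, List.filter_append,
              pvBlocks_append_of_not_mem key ns xs x hkns]
            simp [h2]
          · intro y hy
            have := hn _ (pvMem_blocks key ns xs y hy)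
            simp only [decide_eq_true_eq]; omega
        · intro y hy
          have := beq_iff_eq.mp (List.mem_filter.mp hy).2
          simp only [decide_eq_false_iff_not]; omega
      · rw [if_neg h1, if_neg h2]
        have hkn : key x < n := by omega
        rw [pvInsertBy_append_of_not_before]
        · rw [ih hns (fun hkns => h (by
            intro hm
            rcases List.mem_cons.mp hm with heq | hm
            · exact h2 heq
            · exact hkns hm)),
            pvBlocks_cons, List.filter_append]
          have hne : (key x == n) = false := by
            simp [beq_eq_false_iff_ne]; omega
          simp [hne]
        · intro y hy
          have := beq_iff_eq.mp (List.mem_filter.mp hy).2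
          simp only [decide_eq_false_iff_not]; omega

lemma pvSorted_keys_pairwise (l : List Int) :
    (PySem.List.sorted (PySem.Set.ofList l) (fun x => x) true).Pairwise (fun a b => b < a) := by
  have hle := PySem.List.sorted_pairwise_rev (PySem.Set.ofList l) (fun x => x)
  have hnd : (PySem.List.sorted (PySem.Set.ofList l) (fun x => x) true).Nodup :=
    (PySem.List.sorted_perm (PySem.Set.ofList l) (fun x => x) true).nodup_iff.mpr
      (PySem.Set.nodup_ofList l)
  refine (hle.and hnd).imp ?_
  intro a b hab
  exact lt_of_le_of_ne hab.1 (fun h => hab.2 h.symm)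

lemma pvSortKeys (l : List Int) (k : Int) :
    PySem.List.sorted (PySem.Set.ofList (l ++ [k])) (fun x => x) true
      = pvInsertDesc k (PySem.List.sorted (PySem.Set.ofList l) (fun x => x) true) := by
  have hof : PySem.Set.ofList (l ++ [k]) = PySem.Set.add (PySem.Set.ofList l) k := by
    rw [PySem.Set.ofList_eq_foldl, PySem.Set.ofList_eq_foldl, List.foldl_append]
    rfl
  by_cases hk : k ∈ PySem.Set.ofList l
  · have hadd : PySem.Set.add (PySem.Set.ofList l) k = PySem.Set.ofList l := by
      unfold PySem.Set.add
      rw [if_pos (by simpa [PySem.Set.contains, List.contains_iff_mem] using hk)]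
    have hkin : k ∈ PySem.List.sorted (PySem.Set.ofList l) (fun x => x) true :=
      (PySem.List.mem_sorted _ _ _ _).mpr hk
    rw [hof, hadd, pvInsertDesc_of_mem k _ (pvSorted_keys_pairwise l) hkin]
  · have hadd : PySem.Set.add (PySem.Set.ofList l) k = PySem.Set.ofList l ++ [k] := by
      unfold PySem.Set.add
      rw [if_neg (by simpa [PySem.Set.contains, List.contains_iff_mem] using hk)]
    rw [hof, hadd]
    apply PySem.List.sorted_rev_eq_of_perm_of_pairwise_gt
    · have hknotin : k ∉ PySem.List.sorted (PySem.Set.ofList l) (fun x => x) true := by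
        simpa [PySem.List.mem_sorted] using hk
      exact ((pvInsertDesc_perm_of_not_mem k _ hknotin).trans
        (List.Perm.cons k (PySem.List.sorted_perm _ _ _))).trans
        (List.perm_append_singleton k _).symm
    · exact pvInsertDesc_pairwise k _ (pvSorted_keys_pairwise l)

lemma pvSortedRevEqBlocks {α : Type} (key : α → Int) (xs : List α) :
    PySem.List.sorted xs key true
      = pvBlocks key (PySem.List.sorted (PySem.Set.ofList (xs.map key)) (fun k => k) true) xs := by
  rw [PySem.List.sorted_rev_eq_foldl_insertBy]
  induction xs using List.reverseRecOn with
  | nil => simp [pvBlocks]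
  | append_singleton xs x ih =>
    rw [List.foldl_append, List.foldl_cons, List.foldl_nil, ih]
    have hhyp : (key x ∉ PySem.List.sorted (PySem.Set.ofList (xs.map key)) (fun k => k) true) →
        ∀ p ∈ xs, key p ≠ key x := by
      intro hk p hp heq
      apply hk
      rw [PySem.List.mem_sorted, PySem.Set.mem_ofList]
      exact heq ▸ List.mem_map_of_mem hp
    rw [pvIns key x xs _ (pvSorted_keys_pairwise (xs.map key)) hhyp]
    have : (xs ++ [x]).map key = xs.map key ++ [key x] := by simp
    rw [this, pvSortKeys]

lemma pvCountEq (text : String) :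
    (PySem.Str.split₀ text).foldl
      (fun d word => word.toList.foldl
        (fun d character =>
          if d.contains (PySem.Chars.lowerChar character) then
            d.insert (PySem.Chars.lowerChar character)
              (d.getD (PySem.Chars.lowerChar character) 0 + 1)
          else
            d.insert (PySem.Chars.lowerChar character) 1) d)
      (PySem.Dict.empty : PySem.Dict Char Int)
    = (PySem.Str.split₀ text).foldl
      (fun d word => word.toList.foldl
        (fun d ch =>
          d.insert (PySem.Chars.lowerChar ch)
            (d.getD (PySem.Chars.lowerChar ch) 0 + 1)) d)
      (PySem.Dict.empty : PySem.Dict Char Int) := by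
  congr 1
  funext d word
  congr 1
  funext d ch
  by_cases hc : d.contains (PySem.Chars.lowerChar ch) = true
  · simp [hc]
  · simp only [Bool.not_eq_true] at hc
    simp [hc, PySem.Dict.getD_of_not_contains _ _ hc]

lemma pvReportEq (items : List (Char × Int)) :
    (PySem.List.sorted items (fun x => x.2) true).foldl
      (fun report e =>
        if PySem.Chars.isalpha e.1 then report ++ [pvFmt e.1 e.2] else report) []
    = (PySem.List.sorted
        ((items.foldl (fun b p => b.modify p.2 [] (fun l => l ++ [p.1])) PySem.Dict.empty).keys)
        (fun k => k) true).foldl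
      (fun report n =>
        ((items.foldl (fun b p => b.modify p.2 [] (fun l => l ++ [p.1])) PySem.Dict.empty).getD n []).foldl
          (fun report c =>
            if PySem.Chars.isalpha c then report ++ [pvFmt c n] else report) report) [] := by
  have hkeys : (items.foldl (fun b p => b.modify p.2 [] (fun l => l ++ [p.1])) PySem.Dict.empty).keys
      = PySem.Set.ofList (items.map (fun p => p.2)) := by
    rw [PySem.Dict.keys_foldl_modify_key items (fun p => p.2) [] (fun _ p => (fun l => l ++ [p.1]))]
    rw [PySem.Set.ofList_eq_foldl]
    rfl
  have hbucket : ∀ n : Int,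
      (items.foldl (fun b p => b.modify p.2 [] (fun l => l ++ [p.1])) PySem.Dict.empty).getD n []
        = (items.filter (fun p => p.2 == n)).map (fun p => p.1) := by
    intro n
    have hswap : items.foldl (fun b p => b.modify p.2 [] (fun l => l ++ [p.1])) PySem.Dict.empty
        = (items.map (fun p => (p.2, p.1))).foldl
            (fun b q => b.modify q.1 [] (fun l => l ++ [q.2])) PySem.Dict.empty := by
      rw [List.foldl_map]
    rw [hswap, PySem.Dict.getD_foldl_modify_append]
    simp [List.filter_map, List.map_map, Function.comp_def]
  have hstep : (fun (report : List String) (n : Int) =>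
      ((items.foldl (fun b p => b.modify p.2 [] (fun l => l ++ [p.1])) PySem.Dict.empty).getD n []).foldl
        (fun report c =>
          if PySem.Chars.isalpha c then report ++ [pvFmt c n] else report) report)
      = (fun (report : List String) (n : Int) =>
          report ++ (((items.filter (fun p => p.2 == n)).map (fun p => p.1)).filter
            PySem.Chars.isalpha).map (fun c => pvFmt c n)) := by
    funext report n
    rw [hbucket n, PySem.List.foldl_append_if]
  rw [hkeys, hstep, PySem.List.foldl_append_eq_flatMap, List.nil_append]
  rw [PySem.List.foldl_append_if, List.nil_append,
    pvSortedRevEqBlocks (fun x => x.2) items]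
  unfold pvBlocks
  rw [List.filter_flatMap, List.map_flatMap]
  congr 1
  funext n
  rw [List.filter_map, List.map_map]
  refine List.map_congr_left ?_
  intro e he
  have h2 : e.2 = n := by
    have := (List.mem_filter.mp (List.mem_filter.mp he).1).2
    exact beq_iff_eq.mp this
  simp [h2]

-- ===== VERDICT (by name: the statement is the Claim_ definition above) =====
theorem get_sorted_dict_spec : Claim_equal_get_sorted_dict := by
  intro text _
  unfold Spec_get_sorted_dict get_sorted_dict get_sorted_dict_alt
  simp only []
  rw [pvCountEq text]
  exact pvReportEq _
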